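-- pv_equiv track=rewrite | github.com/XarthDaichi/EstructurasDiscretas | ProgramasClases/buscar_while_analisis/search_analysis.py | buscar_while_instrumentado_sinlena
-- ===== SOURCE A (Python) =====
-- def buscar_while_instrumentado_sinlena(x:int, a:'list[int]')-> int:
--     contador_operaciones = 0
--     p:int = 0
--     contador_operaciones += 1
--     final:int = len(a)
--     contador_operaciones += 1
--     while p < final:
--         contador_operaciones += 1
--         if x == a[p]:
--             contador_operaciones += 2
--             return contador_operaciones
--         else:
--             p += 1
--             contador_operaciones += 3
--     contador_operaciones += 1
--     return contador_operaciones
-- ===== SOURCE B (Python) =====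
-- def buscar_while_instrumentado_sinlena(x: int, a: 'list[int]') -> int:
--     try:
--         return 4 * a.index(x) + 5
--     except ValueError:
--         return 4 * len(a) + 3
-- ===== Notes on version B (the rewrite author's own statement) =====
-- stated objective: simpler
-- what changed: Replaced the instrumented while-loop and manual operation counter with a closed-form count derived from the first match position (a.index via try/except): 4*p+5 on a hit at index p, 4*len(a)+3 on a miss.
import Mathlib
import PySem

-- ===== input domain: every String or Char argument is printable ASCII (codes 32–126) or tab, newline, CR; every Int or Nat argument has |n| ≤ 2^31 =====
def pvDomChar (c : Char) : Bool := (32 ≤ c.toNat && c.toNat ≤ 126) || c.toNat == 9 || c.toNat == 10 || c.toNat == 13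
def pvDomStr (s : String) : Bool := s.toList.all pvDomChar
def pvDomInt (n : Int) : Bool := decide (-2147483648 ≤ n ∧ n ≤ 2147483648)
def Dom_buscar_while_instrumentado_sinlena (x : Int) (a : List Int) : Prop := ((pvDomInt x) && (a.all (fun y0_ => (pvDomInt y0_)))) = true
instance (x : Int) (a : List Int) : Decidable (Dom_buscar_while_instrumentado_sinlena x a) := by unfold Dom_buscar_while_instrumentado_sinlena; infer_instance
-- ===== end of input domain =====

-- B replaces A's instrumented while-loop and manual counter with a closed-form count from the first match position (simpler).


-- ===== PORT A =====
-- the while-loop: per iteration counter += 1, then on match counter += 2 and return,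
-- else p += 1 and counter += 3; after the loop counter += 1 and return.
def pvLoopA (x : Int) : List Int → Int → Int
  | [], c => c + 1
  | h :: t, c => if x = h then (c + 1) + 2 else pvLoopA x t ((c + 1) + 3)

def buscar_while_instrumentado_sinlena (x : Int) (a : List Int) : Int :=
  pvLoopA x a (0 + 1 + 1)

-- ===== PORT B =====
def buscar_while_instrumentado_sinlena_alt (x : Int) (a : List Int) : Int :=
  match PySem.List.index? a x with
  | some p => 4 * (p : Int) + 5
  | none => 4 * (a.length : Int) + 3

-- ===== PRECONDITION & SPEC =====
def Spec_buscar_while_instrumentado_sinlena (x : Int) (a : List Int) (out : Int) : Prop := out = buscar_while_instrumentado_sinlena_alt x a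
instance (x : Int) (a : List Int) (out : Int) : Decidable (Spec_buscar_while_instrumentado_sinlena x a out) := by unfold Spec_buscar_while_instrumentado_sinlena; infer_instance

-- ===== CLAIM (what is proved, stated in full; the proofs are below) =====
def Claim_equal_buscar_while_instrumentado_sinlena : Prop := ∀ (x : Int) (a : List Int), Dom_buscar_while_instrumentado_sinlena x a → Spec_buscar_while_instrumentado_sinlena x a (buscar_while_instrumentado_sinlena x a)

-- ===== LEMMAS AND PROOFS =====
theorem pvLoopA_eq (x : Int) (a : List Int) : ∀ c : Int,
    pvLoopA x a c =
      match PySem.List.index? a x with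
      | some p => c + 4 * (p : Int) + 3
      | none => c + 4 * (a.length : Int) + 1 := by
  induction a with
  | nil => intro c; simp [pvLoopA, PySem.List.index?]
  | cons h t ih =>
    intro c
    by_cases hx : x = h
    · subst hx
      rw [PySem.List.index?_cons_self]
      simp only [pvLoopA, reduceIte]
      push_cast
      ring
    · rw [PySem.List.index?_cons_of_ne t (Ne.symm hx)]
      simp only [pvLoopA, if_neg hx, ih]
      cases hidx : PySem.List.index? t x with
      | none => simp only [Option.map_none, List.length_cons]; push_cast; ring
      | some p => simp only [Option.map_some]; push_cast; ring

-- ===== VERDICT (by name: the statement is the Claim_ definition above) =====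
theorem buscar_while_instrumentado_sinlena_spec : Claim_equal_buscar_while_instrumentado_sinlena := by
  intro x a _
  unfold Spec_buscar_while_instrumentado_sinlena buscar_while_instrumentado_sinlena buscar_while_instrumentado_sinlena_alt
  rw [pvLoopA_eq]
  cases PySem.List.index? a x with
  | none => ring
  | some p => ring
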